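-- pv_equiv track=rewrite | github.com/aarbys/EGE-TRAINER | eighteen.py | solution_easy
-- ===== SOURCE A (Python) =====
-- def create_main_table(a_o_l):
--     sol_table = []
--     for i in range(a_o_l):
--         line = []
--         for j in range(a_o_l):
--             line.append(0)
--         sol_table.append(line)
--     return sol_table
--
-- def solution_easy(table: 'input table from EXCEL', a_o_l: 'Amount of lines'):
--     solution_table = create_main_table(
--         a_o_l)  # Table with full solution of this problem like a solution table[NUMBER][LETTER]
--
--     for i in range(1, a_o_l):
--         solution_table[i][0] = solution_table[i - 1][0] + table[i][0]
--         solution_table[0][i] = solution_table[0][i - 1] + table[0][i]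
--
--     def resolving(amount_of_lines, return_table, main_table, value):
--         for f in range(1, amount_of_lines):
--             for j in range(1, amount_of_lines):
--                 if value == 1:
--                     return_table[f][j] = max(return_table[f - 1][j], return_table[f][j - 1]) + main_table[f][j]
--                 else:
--                     return_table[f][j] = min(return_table[f - 1][j], return_table[f][j - 1]) + main_table[f][j]
--         return return_table
--
--     solution_table = resolving(a_o_l, solution_table, table, 1)
--
--     maximum = solution_table[a_o_l - 1][a_o_l - 1]  # First answer in our problem
--     solution_table = resolving(a_o_l, solution_table, table, 2)
--
--     minimum = solution_table[a_o_l - 1][a_o_l - 1]  # Second answer in our problem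
--     answer = [maximum, minimum]  # Full answer in one variable(probably changed)
--     return answer
-- ===== SOURCE B (Python) =====
-- def solution_easy(table: 'input table from EXCEL', a_o_l: 'Amount of lines'):
--     # Single traversal, rolling row of (max, min) pairs; start cell stays 0 as in the spec.
--     prev = [(0, 0)]
--     acc = 0
--     for j in range(1, a_o_l):
--         acc += table[0][j]
--         prev.append((acc, acc))
--     for i in range(1, a_o_l):
--         first = (prev[0][0] + table[i][0], prev[0][1] + table[i][0])
--         cur = [first]
--         for j in range(1, a_o_l):
--             t = table[i][j]
--             cur.append((max(prev[j][0], cur[j - 1][0]) + t,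
--                         min(prev[j][1], cur[j - 1][1]) + t))
--         prev = cur
--     return [prev[a_o_l - 1][0], prev[a_o_l - 1][1]]
-- ===== Notes on version B (the rewrite author's own statement) =====
-- stated objective: alternative
-- what changed: B computes both answers in one traversal over a rolling row of (max,min) pairs (O(n) extra memory, each cell touched once), instead of allocating an n*n zero grid, filling borders, and running two separate full DP passes that overwrite the grid.
import Mathlib
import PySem

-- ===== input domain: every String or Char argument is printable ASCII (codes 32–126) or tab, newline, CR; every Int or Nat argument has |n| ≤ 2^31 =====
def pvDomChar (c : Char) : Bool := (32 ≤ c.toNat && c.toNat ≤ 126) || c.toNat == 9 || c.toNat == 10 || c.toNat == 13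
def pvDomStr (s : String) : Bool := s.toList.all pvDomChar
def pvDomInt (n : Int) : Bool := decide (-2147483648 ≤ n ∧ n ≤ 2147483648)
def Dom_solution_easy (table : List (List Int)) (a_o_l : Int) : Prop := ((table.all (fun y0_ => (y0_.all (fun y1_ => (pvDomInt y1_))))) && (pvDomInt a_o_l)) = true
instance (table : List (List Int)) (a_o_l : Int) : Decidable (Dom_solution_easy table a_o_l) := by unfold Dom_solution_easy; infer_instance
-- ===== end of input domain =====

-- B changes the decomposition: one traversal with a rolling row of (max,min) pairs instead of an
-- n×n grid with two separate full DP passes; same return value on all inputs where A returns.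

-- ===== PORT A =====
-- 2-D indexing/assignment helpers.  In-range Python indexing l[i] (i ≥ 0) is List.getD i;
-- out-of-range indexing raises IndexError in Python, which Pre_ excludes, so the default 0/[]
-- is never the value actually claimed about.
def gget (g : List (List Int)) (i j : ℕ) : Int := (g.getD i []).getD j 0

def gset (g : List (List Int)) (i j : ℕ) (v : Int) : List (List Int) :=
  g.set i ((g.getD i []).set j v)

def create_main_table (a_o_l : Int) : List (List Int) :=
  (List.range a_o_l.toNat).map (fun _ => (List.range a_o_l.toNat).map (fun _ => (0 : Int)))

def resolving (amount_of_lines : ℕ) (return_table main_table : List (List Int)) (value : Int) :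
    List (List Int) :=
  (List.range' 1 (amount_of_lines - 1)).foldl (fun rt f =>
    (List.range' 1 (amount_of_lines - 1)).foldl (fun rt j =>
      gset rt f j
        ((if value = 1 then max (gget rt (f - 1) j) (gget rt f (j - 1))
          else min (gget rt (f - 1) j) (gget rt f (j - 1))) + gget main_table f j)) rt)
    return_table

def solution_easy (table : List (List Int)) (a_o_l : Int) : List Int :=
  let n := a_o_l.toNat
  let st0 := create_main_table a_o_l
  let st1 := (List.range' 1 (n - 1)).foldl (fun st i =>
      let st := gset st i 0 (gget st (i - 1) 0 + gget table i 0)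
      gset st 0 i (gget st 0 (i - 1) + gget table 0 i)) st0
  let st2 := resolving n st1 table 1
  let maximum := gget st2 (n - 1) (n - 1)
  let st3 := resolving n st2 table 2
  let minimum := gget st3 (n - 1) (n - 1)
  [maximum, minimum]

-- ===== PORT B =====
-- pair-row indexing, same Python convention as gget
def pget (l : List (Int × Int)) (j : ℕ) : Int × Int := l.getD j (0, 0)

def solution_easy_alt (table : List (List Int)) (a_o_l : Int) : List Int :=
  let n := a_o_l.toNat
  let s0 : Int × List (Int × Int) := (0, [((0 : Int), (0 : Int))])
  let s := (List.range' 1 (n - 1)).foldl (fun (s : Int × List (Int × Int)) j =>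
      let acc := s.1 + gget table 0 j
      (acc, s.2 ++ [(acc, acc)])) s0
  let prev := (List.range' 1 (n - 1)).foldl (fun prev i =>
      let first := ((pget prev 0).1 + gget table i 0, (pget prev 0).2 + gget table i 0)
      (List.range' 1 (n - 1)).foldl (fun cur j =>
        let t := gget table i j
        cur ++ [(max (pget prev j).1 (pget cur (j - 1)).1 + t,
                 min (pget prev j).2 (pget cur (j - 1)).2 + t)]) [first]) s.2
  [(pget prev (n - 1)).1, (pget prev (n - 1)).2]

-- ===== PRECONDITION & SPEC =====
-- Pre_ is exactly where Python A returns: a_o_l ≥ 1, and unless a_o_l = 1 (no table access at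
-- all), the first a_o_l rows exist and each has at least a_o_l entries (else IndexError).
def Pre_solution_easy (table : List (List Int)) (a_o_l : Int) : Prop :=
  1 ≤ a_o_l ∧ (a_o_l = 1 ∨ (a_o_l ≤ (table.length : Int) ∧
    ∀ row ∈ table.take a_o_l.toNat, a_o_l ≤ (row.length : Int)))

instance (table : List (List Int)) (a_o_l : Int) : Decidable (Pre_solution_easy table a_o_l) := by
  unfold Pre_solution_easy; infer_instance

def pvWitness_solution_easy : List (List Int) × Int := ([[0, 1], [2, 3]], 2)

def Spec_solution_easy (table : List (List Int)) (a_o_l : Int) (out : List Int) : Prop :=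
  out = solution_easy_alt table a_o_l

instance (table : List (List Int)) (a_o_l : Int) (out : List Int) :
    Decidable (Spec_solution_easy table a_o_l out) := by unfold Spec_solution_easy; infer_instance

-- ===== CLAIM (what is proved, stated in full; the proofs are below) =====
def Claim_equal_solution_easy : Prop := ∀ (table : List (List Int)) (a_o_l : Int),
  Dom_solution_easy table a_o_l → Pre_solution_easy table a_o_l →
  Spec_solution_easy table a_o_l (solution_easy table a_o_l)

-- ===== LEMMAS AND PROOFS =====

-- the common mathematical description: max/min path sums with the start cell counted as 0
def mx (t : ℕ → ℕ → Int) : ℕ → ℕ → Int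
  | 0, 0 => 0
  | 0, j + 1 => mx t 0 j + t 0 (j + 1)
  | i + 1, 0 => mx t i 0 + t (i + 1) 0
  | i + 1, j + 1 => max (mx t i (j + 1)) (mx t (i + 1) j) + t (i + 1) (j + 1)

def mn (t : ℕ → ℕ → Int) : ℕ → ℕ → Int
  | 0, 0 => 0
  | 0, j + 1 => mn t 0 j + t 0 (j + 1)
  | i + 1, 0 => mn t i 0 + t (i + 1) 0
  | i + 1, j + 1 => min (mn t i (j + 1)) (mn t (i + 1) j) + t (i + 1) (j + 1)

lemma mx_col0_eq_mn (t : ℕ → ℕ → Int) : ∀ i, mx t i 0 = mn t i 0 := by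
  intro i; induction i with
  | zero => simp [mx, mn]
  | succ k ih => simp [mx, mn, ih]

lemma mx_row0_eq_mn (t : ℕ → ℕ → Int) : ∀ j, mx t 0 j = mn t 0 j := by
  intro j; induction j with
  | zero => simp [mx, mn]
  | succ k ih => simp [mx, mn, ih]

def Shape (g : List (List Int)) (n : ℕ) : Prop :=
  g.length = n ∧ ∀ r ∈ g, r.length = n


lemma row_len {g : List (List Int)} {n i : ℕ} (h : Shape g n) (hi : i < n) :
    (g.getD i []).length = n := by
  have hlen : i < g.length := by rw [h.1]; exact hi
  have hg : g.getD i [] = g[i] := by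
    simp [List.getD_eq_getElem?_getD, List.getElem?_eq_getElem hlen]
  rw [hg]
  exact h.2 _ (List.getElem_mem hlen)

lemma shape_gset {g : List (List Int)} {n i j : ℕ} (h : Shape g n) (hi : i < n) (v : Int) :
    Shape (gset g i j v) n := by
  unfold gset
  refine ⟨by simpa using h.1, ?_⟩
  intro r hr
  rcases List.mem_or_eq_of_mem_set hr with h' | rfl
  · exact h.2 _ h'
  · have hr := row_len h hi
    simp only [List.getD_eq_getElem?_getD] at hr
    simp [List.length_set, hr]

lemma gget_gset {g : List (List Int)} {n i j : ℕ} (h : Shape g n) (hi : i < n) (hj : j < n)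
    (v : Int) (i' j' : ℕ) :
    gget (gset g i j v) i' j' = if i' = i ∧ j' = j then v else gget g i' j' := by
  have hg : i < g.length := by rw [h.1]; exact hi
  unfold gget gset
  by_cases hii : i' = i
  · subst hii
    have hrow : (g.set i' ((g.getD i' []).set j v)).getD i' [] = (g.getD i' []).set j v := by
      simp [List.getD_eq_getElem?_getD, hg]
    rw [hrow]
    by_cases hjj : j' = j
    · subst hjj
      have hjlen : j' < (g.getD i' []).length := by rw [row_len h hi]; exact hj
      simp only [List.getD_eq_getElem?_getD] at hjlen ⊢
      rw [List.getElem?_eq_getElem (by simpa using hjlen), List.getElem_set_self]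
      rfl
    · simp [List.getD_eq_getElem?_getD, List.getElem?_set_ne (Ne.symm hjj), hjj]
  · simp [List.getD_eq_getElem?_getD, List.getElem?_set_ne (fun hh => hii hh.symm), hii]

lemma pget_append_lt (l : List (Int × Int)) (x : Int × Int) (j : ℕ) (h : j < l.length) :
    pget (l ++ [x]) j = pget l j := by
  simp [pget, List.getD_eq_getElem?_getD, List.getElem?_append_left h]

lemma pget_append_len (l : List (Int × Int)) (x : Int × Int) :
    pget (l ++ [x]) l.length = x := by
  simp [pget, List.getD_eq_getElem?_getD]

lemma mx_step (t : ℕ → ℕ → Int) {i j : ℕ} (hi : 1 ≤ i) (hj : 1 ≤ j) :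
    mx t i j = max (mx t (i - 1) j) (mx t i (j - 1)) + t i j := by
  cases i with
  | zero => omega
  | succ a => cases j with
    | zero => omega
    | succ b => simp [mx]

lemma mn_step (t : ℕ → ℕ → Int) {i j : ℕ} (hi : 1 ≤ i) (hj : 1 ≤ j) :
    mn t i j = min (mn t (i - 1) j) (mn t i (j - 1)) + t i j := by
  cases i with
  | zero => omega
  | succ a => cases j with
    | zero => omega
    | succ b => simp [mn]

lemma mx_col_step (t : ℕ → ℕ → Int) {i : ℕ} (hi : 1 ≤ i) :
    mx t i 0 = mx t (i - 1) 0 + t i 0 := by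
  cases i with
  | zero => omega
  | succ a => simp [mx]

lemma mx_row_step (t : ℕ → ℕ → Int) {j : ℕ} (hj : 1 ≤ j) :
    mx t 0 j = mx t 0 (j - 1) + t 0 j := by
  cases j with
  | zero => omega
  | succ b => simp [mx]

lemma mn_col_step (t : ℕ → ℕ → Int) {i : ℕ} (hi : 1 ≤ i) :
    mn t i 0 = mn t (i - 1) 0 + t i 0 := by
  cases i with
  | zero => omega
  | succ a => simp [mn]

-- ===== A side: the two grid-filling loops =====

lemma inner_fill (n : ℕ) (op : Int → Int → Int) (tb : List (List Int)) (D : ℕ → ℕ → Int)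
    (hrec : ∀ i j, 1 ≤ i → i < n → 1 ≤ j → j < n →
      D i j = op (D (i - 1) j) (D i (j - 1)) + gget tb i j)
    (f : ℕ) (hf1 : 1 ≤ f) (hfn : f < n) :
    ∀ (m s : ℕ) (g : List (List Int)), s + m = n → 1 ≤ s → Shape g n →
    (∀ j' < n, gget g (f - 1) j' = D (f - 1) j') →
    (∀ j' < s, gget g f j' = D f j') →
    Shape ((List.range' s m).foldl
        (fun rt j => gset rt f j (op (gget rt (f - 1) j) (gget rt f (j - 1)) + gget tb f j)) g) n ∧
    (∀ i' j', i' ≠ f → gget ((List.range' s m).foldl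
        (fun rt j => gset rt f j (op (gget rt (f - 1) j) (gget rt f (j - 1)) + gget tb f j)) g) i' j'
        = gget g i' j') ∧
    gget ((List.range' s m).foldl
        (fun rt j => gset rt f j (op (gget rt (f - 1) j) (gget rt f (j - 1)) + gget tb f j)) g) f 0
        = gget g f 0 ∧
    (∀ j' < n, gget ((List.range' s m).foldl
        (fun rt j => gset rt f j (op (gget rt (f - 1) j) (gget rt f (j - 1)) + gget tb f j)) g) f j'
        = D f j') := by
  intro m
  induction m with
  | zero =>
    intro s g hsm hs1 hsh hprev hpre
    refine ⟨by simpa using hsh, by intro i' j' _; rfl, rfl, ?_⟩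
    intro j' hj'
    exact hpre j' (by omega)
  | succ m ih =>
    intro s g hsm hs1 hsh hprev hpre
    have hsn : s < n := by omega
    rw [List.range'_succ, List.foldl_cons]
    set v := op (gget g (f - 1) s) (gget g f (s - 1)) + gget tb f s with hv
    have hval : v = D f s := by
      rw [hv, hprev s hsn, hpre (s - 1) (by omega), ← hrec f s hf1 hfn hs1 hsn]
    have hsh1 : Shape (gset g f s v) n := shape_gset hsh hfn v
    have hget1 : ∀ i' j', gget (gset g f s v) i' j'
        = if i' = f ∧ j' = s then v else gget g i' j' := gget_gset hsh hfn hsn v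
    have hprev1 : ∀ j' < n, gget (gset g f s v) (f - 1) j' = D (f - 1) j' := by
      intro j' hj'
      rw [hget1]
      rw [if_neg (by omega)]
      exact hprev j' hj'
    have hpre1 : ∀ j' < s + 1, gget (gset g f s v) f j' = D f j' := by
      intro j' hj'
      rw [hget1]
      by_cases hj : j' = s
      · rw [if_pos ⟨rfl, hj⟩, hval, hj]
      · rw [if_neg (by tauto)]
        exact hpre j' (by omega)
    obtain ⟨c1, c2, c3, c4⟩ := ih (s + 1) (gset g f s v) (by omega) (by omega) hsh1 hprev1 hpre1
    refine ⟨c1, ?_, ?_, c4⟩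
    · intro i' j' hi'
      rw [c2 i' j' hi', hget1, if_neg (by tauto)]
    · rw [c3, hget1, if_neg (by omega)]

lemma pass_fill (n : ℕ) (op : Int → Int → Int) (tb : List (List Int)) (D : ℕ → ℕ → Int)
    (hrec : ∀ i j, 1 ≤ i → i < n → 1 ≤ j → j < n →
      D i j = op (D (i - 1) j) (D i (j - 1)) + gget tb i j) :
    ∀ (m s : ℕ) (g : List (List Int)), s + m = n → 1 ≤ s → Shape g n →
    (∀ i' < s, ∀ j' < n, gget g i' j' = D i' j') →
    (∀ i' < n, gget g i' 0 = D i' 0) →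
    Shape ((List.range' s m).foldl (fun rt f => (List.range' 1 (n - 1)).foldl
        (fun rt j => gset rt f j (op (gget rt (f - 1) j) (gget rt f (j - 1)) + gget tb f j)) rt) g) n ∧
    (∀ i' < n, ∀ j' < n, gget ((List.range' s m).foldl (fun rt f => (List.range' 1 (n - 1)).foldl
        (fun rt j => gset rt f j (op (gget rt (f - 1) j) (gget rt f (j - 1)) + gget tb f j)) rt) g) i' j'
        = D i' j') := by
  intro m
  induction m with
  | zero =>
    intro s g hsm hs1 hsh hdone _
    exact ⟨by simpa using hsh, fun i' hi' => hdone i' (by omega)⟩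
  | succ m ih =>
    intro s g hsm hs1 hsh hdone hcol
    have hsn : s < n := by omega
    rw [List.range'_succ, List.foldl_cons]
    obtain ⟨c1, c2, c3, c4⟩ := inner_fill n op tb D hrec s hs1 hsn (n - 1) 1 g (by omega)
      (by omega) hsh (fun j' hj' => hdone (s - 1) (by omega) j' hj')
      (by intro j' hj'; interval_cases j'; exact hcol s hsn)
    apply ih (s + 1) _ (by omega) (by omega) c1
    · intro i' hi' j' hj'
      by_cases his : i' = s
      · subst his; exact c4 j' hj'
      · rw [c2 i' j' his]; exact hdone i' (by omega) j' hj'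
    · intro i' hi'
      by_cases his : i' = s
      · subst his; rw [c3]; exact hcol i' hi'
      · rw [c2 i' 0 his]; exact hcol i' hi'

lemma border_fill (n : ℕ) (tb : List (List Int)) :
    ∀ (m s : ℕ) (g : List (List Int)), s + m = n → 1 ≤ s → Shape g n →
    (∀ i' < s, gget g i' 0 = mx (gget tb) i' 0) →
    (∀ j' < s, gget g 0 j' = mx (gget tb) 0 j') →
    Shape ((List.range' s m).foldl (fun st i =>
        gset (gset st i 0 (gget st (i - 1) 0 + gget tb i 0)) 0 i
          (gget (gset st i 0 (gget st (i - 1) 0 + gget tb i 0)) 0 (i - 1) + gget tb 0 i)) g) n ∧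
    (∀ i' < n, gget ((List.range' s m).foldl (fun st i =>
        gset (gset st i 0 (gget st (i - 1) 0 + gget tb i 0)) 0 i
          (gget (gset st i 0 (gget st (i - 1) 0 + gget tb i 0)) 0 (i - 1) + gget tb 0 i)) g) i' 0
        = mx (gget tb) i' 0) ∧
    (∀ j' < n, gget ((List.range' s m).foldl (fun st i =>
        gset (gset st i 0 (gget st (i - 1) 0 + gget tb i 0)) 0 i
          (gget (gset st i 0 (gget st (i - 1) 0 + gget tb i 0)) 0 (i - 1) + gget tb 0 i)) g) 0 j'
        = mx (gget tb) 0 j') := by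
  intro m
  induction m with
  | zero =>
    intro s g hsm hs1 hsh hcol hrow
    exact ⟨by simpa using hsh, fun i' hi' => hcol i' (by omega), fun j' hj' => hrow j' (by omega)⟩
  | succ m ih =>
    intro s g hsm hs1 hsh hcol hrow
    have hsn : s < n := by omega
    have hn1 : 1 ≤ n := by omega
    rw [List.range'_succ, List.foldl_cons]
    set v1 := gget g (s - 1) 0 + gget tb s 0 with hv1
    have hval1 : v1 = mx (gget tb) s 0 := by
      rw [hv1, hcol (s - 1) (by omega), ← mx_col_step (gget tb) hs1]
    have hsh1 : Shape (gset g s 0 v1) n := shape_gset hsh hsn v1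
    have hget1 : ∀ i' j', gget (gset g s 0 v1) i' j'
        = if i' = s ∧ j' = 0 then v1 else gget g i' j' := gget_gset hsh hsn hn1 v1
    set v2 := gget (gset g s 0 v1) 0 (s - 1) + gget tb 0 s with hv2
    have hval2 : v2 = mx (gget tb) 0 s := by
      rw [hv2, hget1, if_neg (by omega), hrow (s - 1) (by omega), ← mx_row_step (gget tb) hs1]
    have hsh2 : Shape (gset (gset g s 0 v1) 0 s v2) n := shape_gset hsh1 hn1 v2
    have hget2 : ∀ i' j', gget (gset (gset g s 0 v1) 0 s v2) i' j'
        = if i' = 0 ∧ j' = s then v2 else gget (gset g s 0 v1) i' j' := gget_gset hsh1 hn1 hsn v2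
    apply ih (s + 1) _ (by omega) (by omega) hsh2
    · intro i' hi'
      rw [hget2, if_neg (by omega), hget1]
      by_cases his : i' = s
      · rw [if_pos ⟨his, rfl⟩, hval1, his]
      · rw [if_neg (by tauto)]
        exact hcol i' (by omega)
    · intro j' hj'
      rw [hget2]
      by_cases hjs : j' = s
      · rw [if_pos ⟨rfl, hjs⟩, hval2, hjs]
      · rw [if_neg (by tauto), hget1, if_neg (by omega)]
        exact hrow j' (by omega)

lemma create_shape (a_o_l : Int) :
    Shape (create_main_table a_o_l) a_o_l.toNat ∧
    ∀ i j, gget (create_main_table a_o_l) i j = 0 := by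
  constructor
  · constructor
    · simp [create_main_table]
    · intro r hr
      simp only [create_main_table, List.mem_map] at hr
      obtain ⟨_, _, hr⟩ := hr
      simp [← hr]
  · intro i j
    have hc : create_main_table a_o_l
        = List.replicate a_o_l.toNat (List.replicate a_o_l.toNat (0 : Int)) := by
      simp [create_main_table, List.map_const']
    rw [hc]
    unfold gget
    simp only [List.getD_eq_getElem?_getD, List.getElem?_replicate]
    by_cases hi : i < a_o_l.toNat
    · rw [if_pos hi]
      simp only [Option.getD_some, List.getElem?_replicate]
      by_cases hj : j < a_o_l.toNat
      · rw [if_pos hj]; rfl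
      · rw [if_neg hj]; rfl
    · rw [if_neg hi]; rfl

lemma A_eq (table : List (List Int)) (a_o_l : Int) (h : 1 ≤ a_o_l.toNat) :
    solution_easy table a_o_l =
      [mx (gget table) (a_o_l.toNat - 1) (a_o_l.toNat - 1),
       mn (gget table) (a_o_l.toNat - 1) (a_o_l.toNat - 1)] := by
  obtain ⟨hsh0, hzero⟩ := create_shape a_o_l
  have hlt : a_o_l.toNat - 1 < a_o_l.toNat := by omega
  obtain ⟨hsh1, hcol1, hrow1⟩ := border_fill a_o_l.toNat table (a_o_l.toNat - 1) 1
    (create_main_table a_o_l) (by omega) le_rfl hsh0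
    (by intro i' hi'; interval_cases i'; rw [hzero]; simp [mx])
    (by intro j' hj'; interval_cases j'; rw [hzero]; simp [mx])
  have hrec1 : ∀ i j, 1 ≤ i → i < a_o_l.toNat → 1 ≤ j → j < a_o_l.toNat →
      mx (gget table) i j
        = max (mx (gget table) (i - 1) j) (mx (gget table) i (j - 1)) + gget table i j :=
    fun i j hi _ hj _ => mx_step (gget table) hi hj
  have hrec2 : ∀ i j, 1 ≤ i → i < a_o_l.toNat → 1 ≤ j → j < a_o_l.toNat →
      mn (gget table) i j
        = min (mn (gget table) (i - 1) j) (mn (gget table) i (j - 1)) + gget table i j :=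
    fun i j hi _ hj _ => mn_step (gget table) hi hj
  obtain ⟨hsh2, hall2⟩ := pass_fill a_o_l.toNat max table (mx (gget table)) hrec1
    (a_o_l.toNat - 1) 1 _ (by omega) le_rfl hsh1
    (by intro i' hi'; interval_cases i'; intro j' hj'; exact hrow1 j' hj') hcol1
  obtain ⟨hsh3, hall3⟩ := pass_fill a_o_l.toNat min table (mn (gget table)) hrec2
    (a_o_l.toNat - 1) 1 _ (by omega) le_rfl hsh2
    (by intro i' hi'; interval_cases i'; intro j' hj'
        rw [hall2 0 (by omega) j' hj']; exact mx_row0_eq_mn (gget table) j')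
    (by intro i' hi'
        rw [hall2 i' hi' 0 (by omega)]; exact mx_col0_eq_mn (gget table) i')
  show solution_easy table a_o_l = _
  unfold solution_easy resolving
  simp only [show ((2 : Int) = 1) = False from by simp, if_true, if_false]
  rw [hall2 _ hlt _ hlt, hall3 _ hlt _ hlt]

-- ===== B side: rolling row of pairs =====

lemma row0_fill (n : ℕ) (tb : List (List Int)) :
    ∀ (m s : ℕ) (acc : Int) (lst : List (Int × Int)), s + m = n → 1 ≤ s →
    lst.length = s → acc = mx (gget tb) 0 (s - 1) →
    (∀ j' < s, pget lst j' = (mx (gget tb) 0 j', mn (gget tb) 0 j')) →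
    ((List.range' s m).foldl (fun (st : Int × List (Int × Int)) j =>
        (st.1 + gget tb 0 j, st.2 ++ [(st.1 + gget tb 0 j, st.1 + gget tb 0 j)])) (acc, lst)).2.length = n ∧
    (∀ j' < n, pget ((List.range' s m).foldl (fun (st : Int × List (Int × Int)) j =>
        (st.1 + gget tb 0 j, st.2 ++ [(st.1 + gget tb 0 j, st.1 + gget tb 0 j)])) (acc, lst)).2 j'
      = (mx (gget tb) 0 j', mn (gget tb) 0 j')) := by
  intro m
  induction m with
  | zero =>
    intro s acc lst hsm hs1 hlen hacc hinv
    simp only [List.range'_zero, List.foldl_nil]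
    exact ⟨by rw [hlen]; omega, fun j' hj' => hinv j' (by omega)⟩
  | succ m ih =>
    intro s acc lst hsm hs1 hlen hacc hinv
    have hsn : s < n := by omega
    rw [List.range'_succ, List.foldl_cons]
    have hacc' : acc + gget tb 0 s = mx (gget tb) 0 s := by
      rw [hacc, ← mx_row_step (gget tb) hs1]
    refine ih (s + 1) (acc + gget tb 0 s) (lst ++ [(acc + gget tb 0 s, acc + gget tb 0 s)])
      (by omega) (by omega) (by simp [hlen]) (by simpa using hacc') ?_
    intro j' hj'
    by_cases hjs : j' = s
    · have hp := pget_append_len lst (acc + gget tb 0 s, acc + gget tb 0 s)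
      rw [hlen] at hp
      rw [hjs, hp, hacc', ← mx_row0_eq_mn]
    · rw [pget_append_lt _ _ _ (by rw [hlen]; omega), hinv j' (by omega)]

lemma rowstep_fill (n : ℕ) (tb : List (List Int)) (prev : List (Int × Int)) (i : ℕ)
    (hi1 : 1 ≤ i) (_hin : i < n)
    (hprev : ∀ j' < n, pget prev j' = (mx (gget tb) (i - 1) j', mn (gget tb) (i - 1) j')) :
    ∀ (m s : ℕ) (cur : List (Int × Int)), s + m = n → 1 ≤ s →
    cur.length = s →
    (∀ j' < s, pget cur j' = (mx (gget tb) i j', mn (gget tb) i j')) →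
    ((List.range' s m).foldl (fun cur j =>
        cur ++ [(max (pget prev j).1 (pget cur (j - 1)).1 + gget tb i j,
                 min (pget prev j).2 (pget cur (j - 1)).2 + gget tb i j)]) cur).length = n ∧
    (∀ j' < n, pget ((List.range' s m).foldl (fun cur j =>
        cur ++ [(max (pget prev j).1 (pget cur (j - 1)).1 + gget tb i j,
                 min (pget prev j).2 (pget cur (j - 1)).2 + gget tb i j)]) cur) j'
      = (mx (gget tb) i j', mn (gget tb) i j')) := by
  intro m
  induction m with
  | zero =>
    intro s cur hsm hs1 hlen hinv
    simp only [List.range'_zero, List.foldl_nil]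
    exact ⟨by rw [hlen]; omega, fun j' hj' => hinv j' (by omega)⟩
  | succ m ih =>
    intro s cur hsm hs1 hlen hinv
    have hsn : s < n := by omega
    rw [List.range'_succ, List.foldl_cons]
    have hnew : (max (pget prev s).1 (pget cur (s - 1)).1 + gget tb i s,
                 min (pget prev s).2 (pget cur (s - 1)).2 + gget tb i s)
        = (mx (gget tb) i s, mn (gget tb) i s) := by
      rw [hprev s hsn, hinv (s - 1) (by omega)]
      rw [mx_step (gget tb) hi1 hs1, mn_step (gget tb) hi1 hs1]
    refine ih (s + 1) _ (by omega) (by omega) (by simp [hlen]) ?_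
    intro j' hj'
    by_cases hjs : j' = s
    · have hp := pget_append_len cur (max (pget prev s).1 (pget cur (s - 1)).1 + gget tb i s,
                 min (pget prev s).2 (pget cur (s - 1)).2 + gget tb i s)
      rw [hlen] at hp
      rw [hjs, hp, hnew]
    · rw [pget_append_lt _ _ _ (by rw [hlen]; omega), hinv j' (by omega)]

lemma rows_fill (n : ℕ) (tb : List (List Int)) :
    ∀ (m s : ℕ) (prev : List (Int × Int)), s + m = n → 1 ≤ s →
    (∀ j' < n, pget prev j' = (mx (gget tb) (s - 1) j', mn (gget tb) (s - 1) j')) →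
    (∀ j' < n, pget ((List.range' s m).foldl (fun prev i =>
        (List.range' 1 (n - 1)).foldl (fun cur j =>
          cur ++ [(max (pget prev j).1 (pget cur (j - 1)).1 + gget tb i j,
                   min (pget prev j).2 (pget cur (j - 1)).2 + gget tb i j)])
          [((pget prev 0).1 + gget tb i 0, (pget prev 0).2 + gget tb i 0)]) prev) j'
      = (mx (gget tb) (n - 1) j', mn (gget tb) (n - 1) j')) := by
  intro m
  induction m with
  | zero =>
    intro s prev hsm hs1 hinv
    simpa [show s - 1 = n - 1 by omega] using hinv
  | succ m ih =>
    intro s prev hsm hs1 hinv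
    have hsn : s < n := by omega
    rw [List.range'_succ, List.foldl_cons]
    have hfirst : ((pget prev 0).1 + gget tb s 0, (pget prev 0).2 + gget tb s 0)
        = (mx (gget tb) s 0, mn (gget tb) s 0) := by
      rw [hinv 0 (by omega)]
      rw [mx_col_step (gget tb) hs1, mn_col_step (gget tb) hs1]
    obtain ⟨_, hrow⟩ := rowstep_fill n tb prev s hs1 hsn hinv (n - 1) 1
      [((pget prev 0).1 + gget tb s 0, (pget prev 0).2 + gget tb s 0)] (by omega) le_rfl
      (by simp)
      (by intro j' hj'; interval_cases j'
          simpa [pget] using hfirst)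
    apply ih (s + 1) _ (by omega) (by omega)
    simpa using hrow

lemma B_eq (table : List (List Int)) (a_o_l : Int) (h : 1 ≤ a_o_l.toNat) :
    solution_easy_alt table a_o_l =
      [mx (gget table) (a_o_l.toNat - 1) (a_o_l.toNat - 1),
       mn (gget table) (a_o_l.toNat - 1) (a_o_l.toNat - 1)] := by
  have hlt : a_o_l.toNat - 1 < a_o_l.toNat := by omega
  obtain ⟨hlen0, hrow0⟩ := row0_fill a_o_l.toNat table (a_o_l.toNat - 1) 1 0 [((0:Int),(0:Int))]
    (by omega) le_rfl rfl (by simp [mx]) (by intro j' hj'; interval_cases j'; simp [pget, mx, mn])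
  have hrows := rows_fill a_o_l.toNat table (a_o_l.toNat - 1) 1 _ (by omega) le_rfl
    (by simpa using hrow0)
  unfold solution_easy_alt
  simp only []
  rw [hrows _ hlt]

-- ===== VERDICT =====
theorem solution_easy_spec : Claim_equal_solution_easy := by
  intro table a_o_l _ hpre
  unfold Spec_solution_easy
  have h1 : 1 ≤ a_o_l.toNat := by
    have := hpre.1; omega
  rw [A_eq table a_o_l h1, B_eq table a_o_l h1]
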